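-- pv_equiv track=rewrite | github.com/ChenxiJ/Coding-Practice | Hackerrank/Alorithms Mix/Stock Maximize/stock_maximize.py | stock_maximize
-- ===== SOURCE A (Python) =====
-- def stock_maximize(prices):
--     max_temp = prices[-1]
--     profit = 0
--     for i in range(len(prices) - 2, -1, -1):
--
--         if prices[i] <= max_temp:
--             profit += max_temp - prices[i]
--
--         max_temp = max(max_temp, prices[i])
--     return profit
-- ===== SOURCE B (Python) =====
-- def stock_maximize(prices):
--     suf = [prices[-1]]
--     for p in reversed(prices[:-1]):
--         suf.append(max(p, suf[-1]))
--     suf.reverse()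
--     return sum(max(s - p, 0) for p, s in zip(prices, suf[1:]))
-- ===== Notes on version B (the rewrite author's own statement) =====
-- stated objective: alternative
-- what changed: Replaces A's single right-to-left pass with a running max and in-loop accumulation by first materialising the suffix-maximum table and then summing max(suf[i+1]-prices[i],0) over a separate forward zip pass.
import Mathlib
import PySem

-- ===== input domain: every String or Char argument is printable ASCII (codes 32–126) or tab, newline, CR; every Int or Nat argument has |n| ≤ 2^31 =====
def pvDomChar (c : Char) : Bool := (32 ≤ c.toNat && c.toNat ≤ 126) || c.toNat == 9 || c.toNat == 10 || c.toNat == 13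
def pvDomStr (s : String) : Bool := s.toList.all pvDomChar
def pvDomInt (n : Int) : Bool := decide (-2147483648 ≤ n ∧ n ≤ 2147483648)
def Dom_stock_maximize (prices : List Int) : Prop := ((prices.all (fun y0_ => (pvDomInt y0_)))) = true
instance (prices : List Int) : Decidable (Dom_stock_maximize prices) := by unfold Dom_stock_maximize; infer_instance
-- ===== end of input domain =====

-- B replaces A's single right-to-left running-max accumulation by an explicit
-- suffix-maximum table plus a separate forward summing pass (objective: alternative).

-- ===== PORT A =====
-- A: max_temp = prices[-1]; then for i in range(len(prices)-2, -1, -1):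
--    profit += max_temp - prices[i] if prices[i] <= max_temp; max_temp = max(max_temp, prices[i]).
-- State (max_temp, profit); indices in the range are always valid, so pyGetD's default is never read.
def stock_maximize (prices : List Int) : Int :=
  match PySem.List.pyGet? prices (-1) with
  | none => 0   -- the last-element access raises IndexError on the empty list; excluded by Pre_
  | some max_temp =>
    ((PySem.List.pyRange (PySem.List.len prices - 2) (-1) (-1)).foldl
      (fun (st : Int × Int) i =>
        (max st.1 (PySem.List.pyGetD prices i 0),
         st.2 + (if PySem.List.pyGetD prices i 0 ≤ st.1 then st.1 - PySem.List.pyGetD prices i 0 else 0)))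
      (max_temp, 0)).2

-- ===== PORT B =====
-- B: suf = [prices[-1]]; for p in reversed(prices[:-1]): suf.append(max(p, suf[-1])); suf.reverse();
--    return sum(max(s - p, 0) for p, s in zip(prices, suf[1:])).
-- suf is built cons-front over the same iteration order, which IS append-at-end followed by the final
-- reverse; acc.headD 0 is suf[-1] (the list is never empty, the default is never read).
def stock_maximize_alt (prices : List Int) : Int :=
  match PySem.List.pyGet? prices (-1) with
  | none => 0   -- the last-element access raises IndexError on the empty list; excluded by Pre_
  | some lastv =>
    let suf := ((PySem.List.slice prices none (some (-1))).reverse).foldl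
      (fun (acc : List Int) p => (max p (acc.headD 0)) :: acc) [lastv]
    (prices.zip (suf.drop 1)).foldl (fun acc ps => acc + max (ps.2 - ps.1) 0) 0

-- ===== PRECONDITION & SPEC =====
-- Pre_ excludes only the empty list, on which A raises IndexError at its initial last-element access.
def Pre_stock_maximize (prices : List Int) : Prop := prices ≠ []
instance (prices : List Int) : Decidable (Pre_stock_maximize prices) := by unfold Pre_stock_maximize; infer_instance
def pvWitness_stock_maximize : List Int := [3, 1, 2]

def Spec_stock_maximize (prices : List Int) (out : Int) : Prop := out = stock_maximize_alt prices
instance (prices : List Int) (out : Int) : Decidable (Spec_stock_maximize prices out) := by unfold Spec_stock_maximize; infer_instance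

-- ===== CLAIM (what is proved, stated in full; the proofs are below) =====
def Claim_equal_stock_maximize : Prop := ∀ (prices : List Int), Dom_stock_maximize prices → Pre_stock_maximize prices → Spec_stock_maximize prices (stock_maximize prices)

-- ===== LEMMAS AND PROOFS =====

-- A's loop body on the VALUE it reads: state (running max, profit).
def stepV (st : Int × Int) (v : Int) : Int × Int :=
  (max st.1 v, st.2 + (if v ≤ st.1 then st.1 - v else 0))

-- Maximum of a nonempty list (0 on [] is never used).
def maxOf : List Int → Int
  | [] => 0
  | [x] => x
  | x :: y :: t => max (maxOf (y :: t)) x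

-- The common value of both programs, by structural recursion.
def prof : List Int → Int
  | [] => 0
  | [_] => 0
  | x :: y :: t => prof (y :: t) + (if x ≤ maxOf (y :: t) then maxOf (y :: t) - x else 0)

-- Suffix maxima: sufList l = [max l[i:] for i in range(len l)].
def sufList : List Int → List Int
  | [] => []
  | [x] => [x]
  | x :: y :: t => max x ((sufList (y :: t)).headD 0) :: sufList (y :: t)

theorem maxOf_cons (x : Int) (t : List Int) (h : t ≠ []) :
    maxOf (x :: t) = max (maxOf t) x := by
  cases t with
  | nil => exact absurd rfl h
  | cons y t' => simp [maxOf]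

theorem prof_cons (x : Int) (t : List Int) (h : t ≠ []) :
    prof (x :: t) = prof t + (if x ≤ maxOf t then maxOf t - x else 0) := by
  cases t with
  | nil => exact absurd rfl h
  | cons y t' => simp [prof]

theorem sufList_cons (x : Int) (t : List Int) (h : t ≠ []) :
    sufList (x :: t) = max x ((sufList t).headD 0) :: sufList t := by
  cases t with
  | nil => exact absurd rfl h
  | cons y t' => simp [sufList]

theorem headD_sufList : ∀ (t : List Int), t ≠ [] → (sufList t).headD 0 = maxOf t
  | [x], _ => by simp [sufList, maxOf]
  | x :: y :: t, _ => by
      rw [sufList_cons x (y :: t) (by simp)]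
      simp only [List.headD_cons]
      rw [headD_sufList (y :: t) (by simp), maxOf_cons x (y :: t) (by simp)]
      exact max_comm _ _

theorem take_rev (l : List Int) (k : Nat) (h : k < l.length) :
    (l.take (k + 1)).reverse = l[k] :: (l.take k).reverse := by
  rw [List.take_add_one]
  simp [List.getElem?_eq_getElem h]

-- A's index fold over range(k, -1, -1) is the value fold over the reversed prefix.
theorem foldlIdx (l : List Int) :
    ∀ (k : Nat), k < l.length → ∀ (s : Int × Int),
      (PySem.List.pyRange (k : Int) (-1) (-1)).foldl
          (fun st i => stepV st (PySem.List.pyGetD l i 0)) s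
        = ((l.take (k + 1)).reverse).foldl stepV s := by
  intro k
  induction k with
  | zero =>
    intro hk s
    rw [PySem.List.pyRange_neg_one_cons (by norm_num),
        PySem.List.pyRange_neg_one_eq_nil (by norm_num)]
    cases l with
    | nil => simp at hk
    | cons a t =>
      simp [stepV, PySem.List.pyGetD_zero_cons]
  | succ k ih =>
    intro hk s
    rw [PySem.List.pyRange_neg_one_cons (by exact_mod_cast by omega : (-1 : Int) < ((k+1 : Nat) : Int))]
    have hcast : ((k + 1 : Nat) : Int) - 1 = (k : Int) := by push_cast; ring
    rw [hcast, List.foldl_cons, ih (by omega)]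
    have hv : PySem.List.pyGetD l ((k + 1 : Nat) : Int) 0 = l[k + 1] := by
      rw [PySem.List.pyGetD_natCast]
      exact List.getD_eq_getElem l 0 hk
    rw [hv, take_rev l (k + 1) hk, List.foldl_cons]

-- The right-to-left value pass computes (max, profit) of the whole list.
theorem foldrStepV : ∀ (xs : List Int) (last s : Int),
    xs.foldr (fun x st => stepV st x) (last, s)
      = (maxOf (xs ++ [last]), s + prof (xs ++ [last]))
  | [], last, s => by simp [maxOf, prof]
  | x :: xs, last, s => by
      rw [List.foldr_cons, foldrStepV xs last s]
      have h : xs ++ [last] ≠ [] := by simp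
      rw [show x :: xs ++ [last] = x :: (xs ++ [last]) from rfl,
          maxOf_cons x (xs ++ [last]) h, prof_cons x (xs ++ [last]) h]
      simp [stepV, add_assoc]

theorem stock_A_prof (l : List Int) (h : l ≠ []) : stock_maximize l = prof l := by
  have hget : PySem.List.pyGet? l (-1) = some (l.getLast h) := by
    rw [PySem.List.pyGet?_neg_one, List.getLast?_eq_some_getLast]
  unfold stock_maximize
  rw [hget]
  dsimp only
  rw [show (fun (st : Int × Int) i =>
        (max st.1 (PySem.List.pyGetD l i 0),
         st.2 + (if PySem.List.pyGetD l i 0 ≤ st.1 then st.1 - PySem.List.pyGetD l i 0 else 0)))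
      = (fun st i => stepV st (PySem.List.pyGetD l i 0)) from rfl]
  by_cases h1 : l.length = 1
  · obtain ⟨x, hx⟩ : ∃ x, l = [x] := by
      cases l with
      | nil => simp at h1
      | cons a t => cases t with
        | nil => exact ⟨a, rfl⟩
        | cons b t' => simp at h1
    subst hx
    rw [show PySem.List.len [x] - 2 = (-1 : Int) by simp [PySem.List.len_eq],
        PySem.List.pyRange_neg_one_eq_nil (by norm_num)]
    simp [prof]
  · have h2 : 2 ≤ l.length := by
      cases l with
      | nil => exact absurd rfl h
      | cons a t => cases t with
        | nil => simp at h1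
        | cons b t' => simp
    have hlen : (PySem.List.len l - 2 : Int) = ((l.length - 2 : Nat) : Int) := by
      simp only [PySem.List.len_eq]; omega
    rw [hlen, foldlIdx l (l.length - 2) (by omega) (l.getLast h, 0)]
    have htake : l.length - 2 + 1 = l.length - 1 := by omega
    rw [htake, ← List.dropLast_eq_take, List.foldl_reverse]
    rw [show (fun (x : Int) (y : Int × Int) => stepV y x) = (fun x st => stepV st x) from rfl]
    rw [foldrStepV l.dropLast (l.getLast h) 0, List.dropLast_concat_getLast h]
    simp

-- Building suf by cons over foldr yields the suffix-max table.
theorem buildSuf : ∀ (xs : List Int) (last : Int),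
    xs.foldr (fun p acc => (max p (acc.headD 0)) :: acc) [last] = sufList (xs ++ [last])
  | [], last => by simp [sufList]
  | x :: xs, last => by
      rw [List.foldr_cons, buildSuf xs last,
          show x :: xs ++ [last] = x :: (xs ++ [last]) from rfl,
          sufList_cons x (xs ++ [last]) (by simp)]

theorem zip_sufList (x : Int) (t : List Int) (h : t ≠ []) :
    (x :: t).zip (sufList t) = (x, (sufList t).headD 0) :: (t.zip ((sufList t).drop 1)) := by
  cases t with
  | nil => exact absurd rfl h
  | cons y t' => cases t' <;> simp [sufList]

-- The forward zip-sum over the suffix-max table computes prof.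
theorem sumZip : ∀ (l : List Int) (a : Int),
    (l.zip ((sufList l).drop 1)).foldl (fun acc ps => acc + max (ps.2 - ps.1) 0) a = a + prof l
  | [], a => by simp [sufList, prof]
  | [x], a => by simp [sufList, prof]
  | x :: y :: t, a => by
      rw [sufList_cons x (y :: t) (by simp)]
      simp only [List.drop_succ_cons, List.drop_zero]
      rw [zip_sufList x (y :: t) (by simp), List.foldl_cons, sumZip (y :: t) _]
      rw [headD_sufList (y :: t) (by simp)]
      simp only [prof]
      rw [max_def]
      split_ifs <;> omega

theorem stock_B_prof (l : List Int) (h : l ≠ []) : stock_maximize_alt l = prof l := by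
  have hget : PySem.List.pyGet? l (-1) = some (l.getLast h) := by
    rw [PySem.List.pyGet?_neg_one, List.getLast?_eq_some_getLast]
  unfold stock_maximize_alt
  rw [hget]
  simp only [PySem.List.slice_to_neg_one, List.foldl_reverse]
  have hb := buildSuf l.dropLast (l.getLast h)
  rw [hb, List.dropLast_concat_getLast h, sumZip l 0]
  simp

-- ===== VERDICT (by name: the statement is the Claim_ definition above) =====
theorem stock_maximize_spec : Claim_equal_stock_maximize := by
  intro prices _ hpre
  unfold Spec_stock_maximize
  rw [stock_A_prof prices hpre, stock_B_prof prices hpre]
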